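-- pv_equiv track=rewrite | github.com/Manuel-OC/2asir_python | mapa.py | BuscarSalto
-- ===== SOURCE A (Python) =====
-- from operator import itemgetter, attrgetter
--
-- def BuscarSalto(f,c,m):
-- 	distancias = [
-- 	    [0,f-1,c-1],
-- 	    [0,f-1,c],
-- 	    [0,f-1,c+1],
-- 	    [0,f,c-1],
-- 	    [0,f,c+1],
-- 	    [0,f+1,c-1],
-- 	    [0,f+1,c],
-- 	    [0,f+1,c+1],
-- 	]
-- 	actual = [f,c]
--
-- 	distancias[0][0] = m[f][c] - m[f-1][c-1]
-- 	distancias[1][0] = m[f][c] - m[f-1][c]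
-- 	distancias[2][0] = m[f][c] - m[f-1][c+1]
-- 	distancias[3][0] = m[f][c] - m[f][c-1]
-- 	distancias[4][0] = m[f][c] - m[f][c+1]
-- 	distancias[5][0] = m[f][c] - m[f+1][c-1]
-- 	distancias[6][0] = m[f][c] - m[f+1][c]
-- 	distancias[7][0] = m[f][c] - m[f+1][c+1]
-- 	distancias = sorted(distancias , key=itemgetter(0))
--
-- 	i=0
-- 	while True:
-- 		if m[distancias[i][1]][distancias[i][2]] < m[f][c]:
-- 			actual[0] = distancias[i][1]
-- 			actual[1] = distancias[i][2]
-- 			break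
-- 		i+=1
--
-- 	return actual
-- ===== SOURCE B (Python) =====
-- def BuscarSalto(f, c, m):
--     cur = m[f][c]
--     best = None  # (value, row, col) of the best strictly-lower neighbor seen so far
--     for dr in (-1, 0, 1):
--         for dc in (-1, 0, 1):
--             if dr == 0 and dc == 0:
--                 continue
--             v = m[f + dr][c + dc]
--             if v < cur and (best is None or v > best[0]):
--                 best = (v, f + dr, c + dc)
--     return [best[1], best[2]]
-- ===== Notes on version B (the rewrite author's own statement) =====
-- stated objective: simpler
-- what changed: Replaces build-8-difference-records + stable sort + scan-for-first-positive with a single pass over the 8 neighbor offsets keeping one best candidate (highest neighbor value strictly below the current cell, first in offset order on ties).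
import Mathlib
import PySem

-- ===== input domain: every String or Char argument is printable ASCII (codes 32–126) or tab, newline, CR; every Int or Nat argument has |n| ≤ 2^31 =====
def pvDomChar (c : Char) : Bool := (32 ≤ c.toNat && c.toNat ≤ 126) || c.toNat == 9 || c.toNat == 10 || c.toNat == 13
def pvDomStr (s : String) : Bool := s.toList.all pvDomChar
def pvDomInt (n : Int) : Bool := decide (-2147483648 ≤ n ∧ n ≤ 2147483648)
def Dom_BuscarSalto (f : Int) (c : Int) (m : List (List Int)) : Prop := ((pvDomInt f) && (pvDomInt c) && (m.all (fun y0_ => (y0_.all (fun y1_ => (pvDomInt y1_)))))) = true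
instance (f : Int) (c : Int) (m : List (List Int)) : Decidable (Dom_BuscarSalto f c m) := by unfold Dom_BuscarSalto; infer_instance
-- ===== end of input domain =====

-- B replaces A's build-8-records + stable-sort + scan-for-first-positive with a single pass
-- over the 8 neighbor offsets keeping one best candidate (objective: simpler, no sort).

-- ===== PORT A =====
-- m[i][j] with Python (negative-wrapping) indexing; none = IndexError
def pvNbr (m : List (List Int)) (i j : Int) : Option Int :=
  match PySem.List.pyGet? m i with
  | none => none
  | some row => PySem.List.pyGet? row j

-- A's 'while True' scan over the sorted list; [] stands for the IndexError cases (outside Pre_)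
def pvLoopA (cur : Int) (m : List (List Int)) : List (Int × Int × Int) → List Int
  | [] => []
  | t :: rest =>
    match pvNbr m t.2.1 t.2.2 with
    | none => []
    | some v => if v < cur then [t.2.1, t.2.2] else pvLoopA cur m rest

def BuscarSalto (f : Int) (c : Int) (m : List (List Int)) : List Int :=
  match pvNbr m f c, pvNbr m (f-1) (c-1), pvNbr m (f-1) c, pvNbr m (f-1) (c+1),
        pvNbr m f (c-1), pvNbr m f (c+1),
        pvNbr m (f+1) (c-1), pvNbr m (f+1) c, pvNbr m (f+1) (c+1) with
  | some cur, some v0, some v1, some v2, some v3, some v4, some v5, some v6, some v7 =>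
      let distancias : List (Int × Int × Int) :=
        [(cur - v0, f-1, c-1), (cur - v1, f-1, c), (cur - v2, f-1, c+1),
         (cur - v3, f, c-1), (cur - v4, f, c+1),
         (cur - v5, f+1, c-1), (cur - v6, f+1, c), (cur - v7, f+1, c+1)]
      pvLoopA cur m (PySem.List.sorted distancias (fun t => t.1) false)
  | _, _, _, _, _, _, _, _, _ => []

-- ===== PORT B =====
-- the 8 (dr, dc) offsets B iterates over, in B's loop order
def pvOffs : List (Int × Int) := [(-1,-1),(-1,0),(-1,1),(0,-1),(0,1),(1,-1),(1,0),(1,1)]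

-- B's single pass: best = (value, row, col) of best strictly-lower neighbor so far;
-- [] stands for the raising cases (out-of-range read / best still None), outside Pre_
def pvLoopB (cur f c : Int) (m : List (List Int)) : List (Int × Int) → Option (Int × Int × Int) → List Int
  | [], best =>
    match best with
    | some b => [b.2.1, b.2.2]
    | none => []
  | p :: rest, best =>
    match pvNbr m (f + p.1) (c + p.2) with
    | none => []
    | some v =>
      let best' : Option (Int × Int × Int) :=
        match best with
        | none => if v < cur then some (v, f + p.1, c + p.2) else none
        | some b => if v < cur ∧ b.1 < v then some (v, f + p.1, c + p.2) else some b
      pvLoopB cur f c m rest best'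

def BuscarSalto_alt (f : Int) (c : Int) (m : List (List Int)) : List Int :=
  match pvNbr m f c with
  | none => []
  | some cur => pvLoopB cur f c m pvOffs none

-- ===== PRECONDITION & SPEC =====
-- Pre_ excludes exactly the inputs where Python A raises: an out-of-range read of m[f][c] or of
-- one of the 8 neighbors (IndexError), or no neighbor strictly lower than m[f][c] (A's scan runs
-- past the end of the sorted list, IndexError; B raises there too).
def Pre_BuscarSalto (f : Int) (c : Int) (m : List (List Int)) : Prop :=
  (pvNbr m f c).isSome = true ∧
  (pvNbr m (f-1) (c-1)).isSome = true ∧ (pvNbr m (f-1) c).isSome = true ∧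
  (pvNbr m (f-1) (c+1)).isSome = true ∧ (pvNbr m f (c-1)).isSome = true ∧
  (pvNbr m f (c+1)).isSome = true ∧ (pvNbr m (f+1) (c-1)).isSome = true ∧
  (pvNbr m (f+1) c).isSome = true ∧ (pvNbr m (f+1) (c+1)).isSome = true ∧
  ((pvNbr m (f-1) (c-1)).getD 0 < (pvNbr m f c).getD 0 ∨
   (pvNbr m (f-1) c).getD 0 < (pvNbr m f c).getD 0 ∨
   (pvNbr m (f-1) (c+1)).getD 0 < (pvNbr m f c).getD 0 ∨
   (pvNbr m f (c-1)).getD 0 < (pvNbr m f c).getD 0 ∨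
   (pvNbr m f (c+1)).getD 0 < (pvNbr m f c).getD 0 ∨
   (pvNbr m (f+1) (c-1)).getD 0 < (pvNbr m f c).getD 0 ∨
   (pvNbr m (f+1) c).getD 0 < (pvNbr m f c).getD 0 ∨
   (pvNbr m (f+1) (c+1)).getD 0 < (pvNbr m f c).getD 0)
instance (f : Int) (c : Int) (m : List (List Int)) : Decidable (Pre_BuscarSalto f c m) := by
  unfold Pre_BuscarSalto; infer_instance

def pvWitness_BuscarSalto : Int × Int × List (List Int) := (1, 1, [[0, 1, 2], [3, 4, 5], [6, 7, 8]])

def Spec_BuscarSalto (f : Int) (c : Int) (m : List (List Int)) (out : List Int) : Prop := out = BuscarSalto_alt f c m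
instance (f : Int) (c : Int) (m : List (List Int)) (out : List Int) : Decidable (Spec_BuscarSalto f c m out) := by unfold Spec_BuscarSalto; infer_instance

-- ===== CLAIM (what is proved, stated in full; the proofs are below) =====
def Claim_equal_BuscarSalto : Prop := ∀ (f : Int) (c : Int) (m : List (List Int)), Dom_BuscarSalto f c m → Pre_BuscarSalto f c m → Spec_BuscarSalto f c m (BuscarSalto f c m)

-- ===== LEMMAS AND PROOFS =====

-- the step of B's best-candidate update, expressed on A's difference records (d = cur - v):
-- keep the record with the smallest positive d, first in list order on ties
def pvStep (best : Option (Int × Int × Int)) (t : Int × Int × Int) : Option (Int × Int × Int) :=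
  match best with
  | none => if 0 < t.1 then some t else none
  | some b => if 0 < t.1 ∧ t.1 < b.1 then some t else some b

-- inserting x at its stable position commutes with "first record with positive d"
theorem pv_find_insertBy (x : Int × Int × Int) (S : List (Int × Int × Int))
    (h : S.Pairwise (fun a b => a.1 ≤ b.1)) :
    List.find? (fun t => decide (0 < t.1)) (PySem.List.insertBy (fun a b => decide (a.1 < b.1)) x S)
      = pvStep (List.find? (fun t => decide (0 < t.1)) S) x := by
  induction S with
  | nil =>
    by_cases hx : 0 < x.1 <;> simp [PySem.List.insertBy, pvStep, List.find?, hx]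
  | cons y t ih =>
    have hpc := List.pairwise_cons.mp h
    have hins : PySem.List.insertBy (fun a b => decide (a.1 < b.1)) x (y :: t)
        = if x.1 < y.1 then x :: y :: t else y :: PySem.List.insertBy (fun a b => decide (a.1 < b.1)) x t := by
      simp [PySem.List.insertBy]
    rw [hins]
    by_cases hxy : x.1 < y.1
    · simp only [if_pos hxy]
      by_cases hx : 0 < x.1
      · have hfx : List.find? (fun t => decide (0 < t.1)) (x :: y :: t) = some x := by
          simp [List.find?, hx]
        rw [hfx]
        cases hf : List.find? (fun t => decide (0 < t.1)) (y :: t) with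
        | none => simp [pvStep, hx]
        | some b =>
          have hb : b = y ∨ b ∈ t := by
            have := List.mem_of_find?_eq_some hf
            simpa using this
          have hyb : y.1 ≤ b.1 := by
            rcases hb with rfl | hbt
            · exact le_refl _
            · exact hpc.1 b hbt
          have : 0 < x.1 ∧ x.1 < b.1 := ⟨hx, lt_of_lt_of_le hxy hyb⟩
          simp [pvStep, this]
      · have hfx : List.find? (fun t => decide (0 < t.1)) (x :: y :: t)
            = List.find? (fun t => decide (0 < t.1)) (y :: t) := by
          simp [List.find?, hx]
        rw [hfx]
        cases hf : List.find? (fun t => decide (0 < t.1)) (y :: t) with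
        | none => simp [pvStep, hx]
        | some b => simp [pvStep, hx]
    · simp only [if_neg hxy]
      by_cases hy : 0 < y.1
      · have h1 : List.find? (fun t => decide (0 < t.1))
            (y :: PySem.List.insertBy (fun a b => decide (a.1 < b.1)) x t) = some y := by
          simp [List.find?, hy]
        have h2 : List.find? (fun t => decide (0 < t.1)) (y :: t) = some y := by
          simp [List.find?, hy]
        rw [h1, h2]
        simp [pvStep, hxy]
      · have h1 : List.find? (fun t => decide (0 < t.1))
            (y :: PySem.List.insertBy (fun a b => decide (a.1 < b.1)) x t)
            = List.find? (fun t => decide (0 < t.1)) (PySem.List.insertBy (fun a b => decide (a.1 < b.1)) x t) := by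
          simp [List.find?, hy]
        have h2 : List.find? (fun t => decide (0 < t.1)) (y :: t)
            = List.find? (fun t => decide (0 < t.1)) t := by
          simp [List.find?, hy]
        rw [h1, h2, ih hpc.2]

-- the first positive-d record of the stable sort IS B's left fold of best-candidate updates
theorem pv_find_sorted (L : List (Int × Int × Int)) :
    List.find? (fun t => decide (0 < t.1)) (PySem.List.sorted L (fun t => t.1) false)
      = L.foldl pvStep none := by
  induction L using List.reverseRecOn with
  | nil => simp [PySem.List.sorted_eq_foldl_insertBy]
  | append_singleton xs x ih =>
    rw [PySem.List.sorted_eq_foldl_insertBy, List.foldl_append, List.foldl_cons, List.foldl_nil,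
      ← PySem.List.sorted_eq_foldl_insertBy,
      pv_find_insertBy x _ (PySem.List.sorted_pairwise xs (fun t => t.1)),
      ih, List.foldl_append, List.foldl_cons, List.foldl_nil]

-- A's scan = "first record with positive d", given that each record's re-read returns cur - d
theorem pv_loopA_eq (cur : Int) (m : List (List Int)) (S : List (Int × Int × Int))
    (h : ∀ t ∈ S, pvNbr m t.2.1 t.2.2 = some (cur - t.1)) :
    pvLoopA cur m S = match List.find? (fun t => decide (0 < t.1)) S with
      | some t => [t.2.1, t.2.2]
      | none => [] := by
  induction S with
  | nil => simp [pvLoopA]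
  | cons t rest ih =>
    have ht := h t (by simp)
    by_cases hpos : 0 < t.1
    · have : cur - t.1 < cur := by omega
      simp [pvLoopA, ht, this, List.find?, hpos]
    · have : ¬ (cur - t.1 < cur) := by omega
      simp only [pvLoopA, ht, if_neg this]
      rw [List.find?_cons_of_neg (by simpa using hpos)]
      exact ih (fun u hu => h u (by simp [hu]))

-- B's state, translated to A's difference records
def pvConv (cur : Int) (best : Option (Int × Int × Int)) : Option (Int × Int × Int) :=
  best.map (fun b => (cur - b.1, b.2.1, b.2.2))

-- B's pass = the pvStep fold over the corresponding difference records
theorem pv_loopB_eq (cur f c : Int) (m : List (List Int)) (offs : List (Int × Int))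
    (best : Option (Int × Int × Int))
    (h : ∀ p ∈ offs, (pvNbr m (f + p.1) (c + p.2)).isSome = true) :
    pvLoopB cur f c m offs best =
      match (offs.map (fun p => (cur - (pvNbr m (f + p.1) (c + p.2)).getD 0, f + p.1, c + p.2))).foldl
          pvStep (pvConv cur best) with
      | some t => [t.2.1, t.2.2]
      | none => [] := by
  induction offs generalizing best with
  | nil =>
    cases best with
    | none => simp [pvLoopB, pvConv]
    | some b => simp [pvLoopB, pvConv]
  | cons p rest ih =>
    obtain ⟨v, hv⟩ := Option.isSome_iff_exists.mp (h p (by simp))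
    have hstep : ∀ best' : Option (Int × Int × Int),
        pvLoopB cur f c m (p :: rest) best' =
          pvLoopB cur f c m rest
            (match best' with
             | none => if v < cur then some (v, f + p.1, c + p.2) else none
             | some b => if v < cur ∧ b.1 < v then some (v, f + p.1, c + p.2) else some b) := by
      intro best'; simp [pvLoopB, hv]
    rw [hstep best]
    rw [ih _ (fun q hq => h q (by simp [hq]))]
    have hconv : pvConv cur
        (match best with
         | none => if v < cur then some (v, f + p.1, c + p.2) else none
         | some b => if v < cur ∧ b.1 < v then some (v, f + p.1, c + p.2) else some b)
        = pvStep (pvConv cur best) (cur - v, f + p.1, c + p.2) := by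
      cases best with
      | none =>
        by_cases hvc : v < cur
        · simp [pvConv, pvStep, hvc]
        · simp [pvConv, pvStep, hvc]
      | some b =>
        by_cases hvc : v < cur ∧ b.1 < v
        · simp [pvConv, pvStep, hvc, show (0:Int) < cur - v ∧ cur - v < cur - b.1 by omega]
        · simp [pvConv, pvStep, hvc]

    rw [List.map_cons, List.foldl_cons, hv]
    simp only [Option.getD_some]
    rw [← hconv]

-- ===== VERDICT (by name: the statement is the Claim_ definition above) =====
theorem BuscarSalto_spec : Claim_equal_BuscarSalto := by
  intro f c m _ hpre
  obtain ⟨p0, p1, p2, p3, p4, p5, p6, p7, p8, -⟩ := hpre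
  obtain ⟨cur, hcur⟩ := Option.isSome_iff_exists.mp p0
  obtain ⟨v0, h0⟩ := Option.isSome_iff_exists.mp p1
  obtain ⟨v1, h1⟩ := Option.isSome_iff_exists.mp p2
  obtain ⟨v2, h2⟩ := Option.isSome_iff_exists.mp p3
  obtain ⟨v3, h3⟩ := Option.isSome_iff_exists.mp p4
  obtain ⟨v4, h4⟩ := Option.isSome_iff_exists.mp p5
  obtain ⟨v5, h5⟩ := Option.isSome_iff_exists.mp p6
  obtain ⟨v6, h6⟩ := Option.isSome_iff_exists.mp p7
  obtain ⟨v7, h7⟩ := Option.isSome_iff_exists.mp p8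
  have ef : f + (-1 : Int) = f - 1 := by ring
  have ec : c + (-1 : Int) = c - 1 := by ring
  have ef0 : f + (0 : Int) = f := by ring
  have ec0 : c + (0 : Int) = c := by ring
  unfold Spec_BuscarSalto BuscarSalto BuscarSalto_alt
  rw [hcur, h0, h1, h2, h3, h4, h5, h6, h7]
  dsimp only
  have hA := pv_loopA_eq cur m
    (PySem.List.sorted
      [(cur - v0, f-1, c-1), (cur - v1, f-1, c), (cur - v2, f-1, c+1),
       (cur - v3, f, c-1), (cur - v4, f, c+1),
       (cur - v5, f+1, c-1), (cur - v6, f+1, c), (cur - v7, f+1, c+1)]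
      (fun t => t.1) false)
    (by
      intro t htm
      rw [PySem.List.mem_sorted] at htm
      fin_cases htm <;> simp only []
      · rw [show cur - (cur - v0) = v0 by ring]; exact h0
      · rw [show cur - (cur - v1) = v1 by ring]; exact h1
      · rw [show cur - (cur - v2) = v2 by ring]; exact h2
      · rw [show cur - (cur - v3) = v3 by ring]; exact h3
      · rw [show cur - (cur - v4) = v4 by ring]; exact h4
      · rw [show cur - (cur - v5) = v5 by ring]; exact h5
      · rw [show cur - (cur - v6) = v6 by ring]; exact h6
      · rw [show cur - (cur - v7) = v7 by ring]; exact h7)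
  have hB := pv_loopB_eq cur f c m pvOffs none
    (by
      intro p hp
      fin_cases hp <;> simp only [ef, ec, ef0, ec0]
      · rw [h0]; rfl
      · rw [h1]; rfl
      · rw [h2]; rfl
      · rw [h3]; rfl
      · rw [h4]; rfl
      · rw [h5]; rfl
      · rw [h6]; rfl
      · rw [h7]; rfl)
  have hmap : (pvOffs.map (fun p => (cur - (pvNbr m (f + p.1) (c + p.2)).getD 0, f + p.1, c + p.2)))
      = [(cur - v0, f-1, c-1), (cur - v1, f-1, c), (cur - v2, f-1, c+1),
         (cur - v3, f, c-1), (cur - v4, f, c+1),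
         (cur - v5, f+1, c-1), (cur - v6, f+1, c), (cur - v7, f+1, c+1)] := by
    simp only [pvOffs, List.map_cons, List.map_nil, ef, ec, ef0, ec0, h0, h1, h2, h3, h4, h5, h6, h7,
      Option.getD_some]
  rw [hB, hmap, pvConv, Option.map_none]
  rw [hA, pv_find_sorted]
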